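-- pv_equiv track=rewrite | github.com/coding-samu/Algo2 | greedyMethods.py | file
-- ===== SOURCE A (Python) =====
-- def file(D, k):
--     """
--     Selects files from a list based on their sizes, until the total size of selected files is less than or equal to a given limit.
--
--     Args:
--         D (list): A list of file sizes.
--         k (int): The maximum total size of selected files.
--
--     Returns:
--         list: A list of indices of the selected files.
--
--     """
--     n = len(D)
--     lista = [(D[i], i) for i in range(n)]
--     lista.sort()
--     spazio, sol = 0, []
--     for d, i in lista:
--         if spazio + d <= k:
--             sol.append(i)
--             spazio += d
--         else:
--             return sol
-- ===== SOURCE B (Python) =====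
-- def file(D, k):
--     # Different decomposition: sort pairs, build a prefix-sum table,
--     # find the first position where the cumulative sum exceeds k, slice.
--     pairs = sorted((d, i) for i, d in enumerate(D))
--     prefix = []
--     total = 0
--     for d, _ in pairs:
--         total += d
--         prefix.append(total)
--     p = next((j for j, s in enumerate(prefix) if s > k), len(prefix))
--     return [i for _, i in pairs[:p]]
-- ===== Notes on version B (the rewrite author's own statement) =====
-- stated objective: alternative
-- what changed: Replaces A's single stateful loop with early return by a three-phase pipeline: prefix-sum table over the sorted sizes, cutoff = first position whose cumulative sum exceeds k, then a slice of the sorted pairs.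
-- outside the precondition, e.g. on file([], 0): A returns None, B returns []; on file([1, 2], 10): A returns None, B returns [0, 1]
import Mathlib
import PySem

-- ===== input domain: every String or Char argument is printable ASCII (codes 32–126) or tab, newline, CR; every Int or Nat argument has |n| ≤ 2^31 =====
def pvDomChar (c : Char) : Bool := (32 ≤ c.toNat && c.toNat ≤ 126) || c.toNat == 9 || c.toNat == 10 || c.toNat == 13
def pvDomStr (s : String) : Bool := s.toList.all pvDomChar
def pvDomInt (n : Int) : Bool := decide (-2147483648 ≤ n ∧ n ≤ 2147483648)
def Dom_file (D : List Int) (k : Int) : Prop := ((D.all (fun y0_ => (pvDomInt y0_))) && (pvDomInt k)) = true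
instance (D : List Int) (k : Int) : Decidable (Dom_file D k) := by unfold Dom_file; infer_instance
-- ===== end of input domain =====

-- B replaces A's stateful loop with early return by a prefix-sum table, a cutoff search and a
-- slice (objective: alternative decomposition, same cost). Equivalence of return values on Pre_.

-- ===== PORT A =====
-- the 'for d, i in lista' loop of A; at list end Python A returns None (excluded by Pre_file),
-- the port returns the accumulated sol there.
def fileLoop (k : Int) : List (Int × Int) → Int → List Int → List Int
  | [], _, sol => sol
  | (d, i) :: rest, spazio, sol =>
    if spazio + d ≤ k then fileLoop k rest (spazio + d) (sol ++ [i]) else sol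

def file (D : List Int) (k : Int) : List Int :=
  let lista := PySem.List.sorted2
    ((PySem.List.enumerate D).map (fun p => (p.2, p.1))) Prod.fst Prod.snd
  fileLoop k lista 0 []

-- ===== PORT B =====
-- the prefix-sum building loop of B (total starts at 0, appends total+d each step)
def buildPrefix : List (Int × Int) → Int → List Int
  | [], _ => []
  | (d, _) :: rest, total => (total + d) :: buildPrefix rest (total + d)

-- next((j for j, s in enumerate(prefix) if s > k), len(prefix))
def firstOver (k : Int) : List Int → Nat
  | [] => 0
  | s :: rest => if s > k then 0 else firstOver k rest + 1

def file_alt (D : List Int) (k : Int) : List Int :=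
  let pairs := PySem.List.sorted2
    ((PySem.List.enumerate D).map (fun p => (p.2, p.1))) Prod.fst Prod.snd
  let pref := buildPrefix pairs 0
  (pairs.take (firstOver k pref)).map Prod.snd

-- ===== PRECONDITION & SPEC =====
-- Pre_ excludes exactly the inputs on which every prefix of the sorted sizes fits within k:
-- there Python A falls off its loop and returns None, not a list.
def Pre_file (D : List Int) (k : Int) : Prop :=
  (((PySem.List.sorted D (fun x => x)).scanl (· + ·) 0).tail.any (fun s => decide (s > k))) = true
instance (D : List Int) (k : Int) : Decidable (Pre_file D k) := by unfold Pre_file; infer_instance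

def pvWitness_file : List Int × Int := ([5, 1], 3)

def Spec_file (D : List Int) (k : Int) (out : List Int) : Prop := out = file_alt D k
instance (D : List Int) (k : Int) (out : List Int) : Decidable (Spec_file D k out) := by unfold Spec_file; infer_instance

-- ===== CLAIM (what is proved, stated in full; the proofs are below) =====
def Claim_equal_file : Prop := ∀ (D : List Int) (k : Int), Dom_file D k → Pre_file D k → Spec_file D k (file D k)

-- ===== LEMMAS AND PROOFS =====
theorem fileLoop_eq_take (k : Int) (L : List (Int × Int)) :
    ∀ (acc : Int) (sol : List Int),
      fileLoop k L acc sol = sol ++ (L.take (firstOver k (buildPrefix L acc))).map Prod.snd := by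
  induction L with
  | nil => intro acc sol; simp [fileLoop, buildPrefix, firstOver]
  | cons p rest ih =>
    intro acc sol
    obtain ⟨d, i⟩ := p
    simp only [fileLoop, buildPrefix, firstOver]
    by_cases h : acc + d ≤ k
    · have hnot : ¬ acc + d > k := by omega
      simp [h, hnot, ih (acc + d) (sol ++ [i])]
    · have hgt : acc + d > k := by omega
      simp [h, hgt]

-- ===== VERDICT (by name: the statement is the Claim_ definition above) =====
theorem file_spec : Claim_equal_file := by
  intro D k _ _
  unfold Spec_file file file_alt
  exact fileLoop_eq_take k _ 0 []
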